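-- pv_equiv track=rewrite | github.com/phgandhi02/isaac-sim-4.1.0 | exts/omni.isaac.core/omni/isaac/core/utils/string.py | find_root_prim_path_from_regex
-- ===== SOURCE A (Python) =====
-- from typing import Callable, Tuple
--
-- def find_root_prim_path_from_regex(prim_path_regex: str) -> Tuple[str, int]:
--     """Find the first prim above the regex pattern prim and its position.
--
--     Args:
--         prim_path_regex (str): full prim path including the regex pattern prim.
--
--     Returns:
--         Tuple[str, int]: First position is the prim path to the parent of the regex prim.
--                     Second position represents the level of the regex prim in the USD stage tree representation.
--
--     """
--     prim_paths_list = str(prim_path_regex).split("/")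
--     root_idx = None
--     for prim_path_idx in range(len(prim_paths_list)):
--         chars = set("[]*|^")
--         if any((c in chars) for c in prim_paths_list[prim_path_idx]):
--             root_idx = prim_path_idx
--             break
--     root_prim_path = None
--     tree_level = None
--     if root_idx is not None:
--         root_prim_path = "/".join(prim_paths_list[:root_idx])
--         tree_level = root_idx
--     return root_prim_path, tree_level
-- ===== SOURCE B (Python) =====
-- def find_root_prim_path_from_regex(prim_path_regex: str):
--     """Single left-to-right character scan: the answer is read off from the
--     position of the last '/' before the first regex special character."""
--     s = str(prim_path_regex)
--     slashes = 0
--     last = 0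
--     for i, c in enumerate(s):
--         if c in "[]*|^":
--             return s[:last], slashes
--         if c == "/":
--             slashes += 1
--             last = i
--     return None, None
-- ===== Notes on version B (the rewrite author's own statement) =====
-- stated objective: alternative
-- what changed: Replaces split-into-segments plus per-segment set-membership scans and a final separator join with a single character pass that stops at the first special character, counting slashes and remembering the last slash position so the answer is one substring slice.
import Mathlib
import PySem

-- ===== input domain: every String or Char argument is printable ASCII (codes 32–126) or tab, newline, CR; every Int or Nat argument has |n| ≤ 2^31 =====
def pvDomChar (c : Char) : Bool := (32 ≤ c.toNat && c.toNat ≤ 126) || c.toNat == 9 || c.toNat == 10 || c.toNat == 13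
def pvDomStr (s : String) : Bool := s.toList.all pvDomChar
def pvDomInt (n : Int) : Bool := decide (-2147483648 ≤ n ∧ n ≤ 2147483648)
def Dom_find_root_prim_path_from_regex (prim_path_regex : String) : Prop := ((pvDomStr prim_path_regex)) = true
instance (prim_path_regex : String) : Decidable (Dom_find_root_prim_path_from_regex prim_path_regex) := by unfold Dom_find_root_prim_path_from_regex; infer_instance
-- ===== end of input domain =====

-- B replaces A's split-into-segments / per-segment membership scan / final join with a single
-- character pass that counts slashes and remembers the last slash position (same return value).

-- ===== PORT A =====
-- chars = set("[]*|^")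
def pvChars : PySem.Set Char := PySem.Set.ofList ['[', ']', '*', '|', '^']

-- any((c in chars) for c in seg)
def pvAnySpecial (seg : List Char) : Bool := seg.any (fun c => pvChars.contains c)

-- the for-loop over range(len(prim_paths_list)) with break: first index whose segment matches
def pvALoop (segs : List (List Char)) (idx : Int) : Option Int :=
  match segs with
  | [] => none
  | seg :: rest => if pvAnySpecial seg then some idx else pvALoop rest (idx + 1)

-- body after the split: the loop result turned into (root_prim_path, tree_level)
def pvAResult (prim_paths_list : List (List Char)) : Option String × Option Int :=
  match pvALoop prim_paths_list 0 with
  | none => (none, none)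
  | some root_idx =>
      (some (String.ofList (PySem.Chars.join ['/'] (PySem.List.slice prim_paths_list none (some root_idx)))),
       some root_idx)

def find_root_prim_path_from_regex (prim_path_regex : String) : Option String × Option Int :=
  pvAResult (PySem.Chars.splitOn prim_path_regex.toList ['/'])

-- ===== PORT B =====
-- the for-loop over enumerate(s): i = index, slashes = '/' count so far, last = index of last '/'
def pvBLoop (s : List Char) (rest : List Char) (i slashes last : Int) : Option String × Option Int :=
  match rest with
  | [] => (none, none)
  | c :: t =>
    if PySem.Chars.isIn [c] ['[', ']', '*', '|', '^'] then
      (some (String.ofList (PySem.Chars.slice s none (some last))), some slashes)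
    else if c = '/' then pvBLoop s t (i + 1) (slashes + 1) i
    else pvBLoop s t (i + 1) slashes last

def find_root_prim_path_from_regex_alt (prim_path_regex : String) : Option String × Option Int :=
  pvBLoop prim_path_regex.toList prim_path_regex.toList 0 0 0

-- ===== PRECONDITION & SPEC =====
def Spec_find_root_prim_path_from_regex (prim_path_regex : String) (out : Option String × Option Int) : Prop := out = find_root_prim_path_from_regex_alt prim_path_regex
instance (prim_path_regex : String) (out : Option String × Option Int) : Decidable (Spec_find_root_prim_path_from_regex prim_path_regex out) := by unfold Spec_find_root_prim_path_from_regex; infer_instance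

-- ===== CLAIM (what is proved, stated in full; the proofs are below) =====
def Claim_equal_find_root_prim_path_from_regex : Prop := ∀ (prim_path_regex : String), Dom_find_root_prim_path_from_regex prim_path_regex → Spec_find_root_prim_path_from_regex prim_path_regex (find_root_prim_path_from_regex prim_path_regex)

-- ===== LEMMAS AND PROOFS =====

-- is c one of "[]*|^"?
def pvSpecial (c : Char) : Bool := decide (c ∈ (['[', ']', '*', '|', '^'] : List Char))

-- reference split on '/'
def pvSplit : List Char → List (List Char)
  | [] => [[]]
  | c :: t =>
    if c = '/' then [] :: pvSplit t
    else match pvSplit t with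
         | [] => [[c]]
         | h :: r => (c :: h) :: r

def pvConsHead (p : List Char) : List (List Char) → List (List Char)
  | [] => [p]
  | h :: r => (p ++ h) :: r

-- reference result: (prefix chars, slash count k, offset l of last '/' before the first special char)
def pvR : List Char → Option (List Char × Nat × Nat)
  | [] => none
  | c :: t =>
    if pvSpecial c then some ([], 0, 0)
    else match pvR t with
      | none => none
      | some (p, k, l) =>
        if c = '/' then some ((if k = 0 then [] else '/' :: p), k + 1, if k = 0 then 0 else l + 1)
        else some ((if k = 0 then [] else c :: p), k, if k = 0 then 0 else l + 1)

-- first segment index containing a special char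
def pvFirst : List (List Char) → Option Nat
  | [] => none
  | seg :: rest => if pvAnySpecial seg then some 0 else (pvFirst rest).map (· + 1)

theorem pvSplit_ne_nil (cs : List Char) : pvSplit cs ≠ [] := by
  induction cs with
  | nil => simp [pvSplit]
  | cons c t ih =>
    simp only [pvSplit]
    split
    · simp
    · cases h : pvSplit t <;> simp

theorem pvContains_eq (c : Char) : pvChars.contains c = pvSpecial c := by
  have h1 : pvChars.contains c = true ↔ c ∈ (['[', ']', '*', '|', '^'] : List Char) := by
    rw [PySem.Set.contains_iff]
    exact PySem.Set.mem_ofList _ c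
  by_cases h : c ∈ (['[', ']', '*', '|', '^'] : List Char)
  · rw [h1.2 h]; simp [pvSpecial, h]
  · have h2 : pvChars.contains c = false := by
      cases hc : pvChars.contains c
      · rfl
      · exact absurd (h1.1 hc) h
    rw [h2]; simp [pvSpecial, h]

theorem pvAnySpecial_nil : pvAnySpecial [] = false := rfl

theorem pvAnySpecial_cons (c : Char) (seg : List Char) :
    pvAnySpecial (c :: seg) = (pvSpecial c || pvAnySpecial seg) := by
  unfold pvAnySpecial
  rw [List.any_cons, pvContains_eq]

theorem pvIsIn_eq (c : Char) : PySem.Chars.isIn [c] ['[', ']', '*', '|', '^'] = pvSpecial c := by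
  by_cases h : c ∈ (['[', ']', '*', '|', '^'] : List Char)
  · simp [pvSpecial, h, (PySem.Chars.isIn_iff_infix _ _).2 ((List.singleton_infix_iff c _).2 h)]
  · have h2 : PySem.Chars.isIn [c] ['[', ']', '*', '|', '^'] = false := by
      cases hc : PySem.Chars.isIn [c] ['[', ']', '*', '|', '^']
      · rfl
      · exact absurd ((List.singleton_infix_iff c _).1 ((PySem.Chars.isIn_iff_infix _ _).1 hc)) h
    rw [h2]; simp [pvSpecial, h]

-- splitOn ['/'] computes pvSplit
theorem pvGo_spec (fuel : Nat) (l cur : List Char) (acc : List (List Char))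
    (h : l.length < fuel) :
    PySem.Chars.splitOn.go ['/'] fuel l cur acc
      = acc.reverse ++ pvConsHead cur.reverse (pvSplit l) := by
  induction fuel generalizing l cur acc with
  | zero => omega
  | succ f ih =>
    cases l with
    | nil =>
      rw [PySem.Chars.splitOn.go.eq_def]
      simp [pvSplit, pvConsHead]
    | cons c t =>
      rw [PySem.Chars.splitOn.go.eq_def]
      simp only []
      by_cases hc : c = '/'
      · subst hc
        have hp : List.isPrefixOf ['/'] ('/' :: t) = true := by
          simp [List.isPrefixOf]
        simp only [hp, if_true, List.length_cons, List.drop_succ_cons, List.length_nil, List.drop_zero]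
        rw [ih t [] (cur.reverse :: acc) (by simpa using Nat.lt_of_succ_lt_succ h)]
        simp only [pvSplit, if_pos rfl, List.reverse_cons, List.reverse_nil, List.nil_append]
        cases hsp : pvSplit t with
        | nil => exact absurd hsp (pvSplit_ne_nil t)
        | cons sh sr => simp [pvConsHead]
      · have hp : List.isPrefixOf ['/'] (c :: t) = false := by
          simp [List.isPrefixOf, Ne.symm hc]
        simp only [hp, Bool.false_eq_true, if_false]
        rw [ih t (c :: cur) acc (by simpa using Nat.lt_of_succ_lt_succ h)]
        simp only [pvSplit, if_neg hc, List.reverse_cons]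
        cases hsp : pvSplit t with
        | nil => exact absurd hsp (pvSplit_ne_nil t)
        | cons sh sr => simp [pvConsHead]

theorem pvSplitOn_eq (cs : List Char) : PySem.Chars.splitOn cs ['/'] = pvSplit cs := by
  unfold PySem.Chars.splitOn
  rw [pvGo_spec (cs.length + 1) cs [] [] (Nat.lt_succ_self _)]
  cases hsp : pvSplit cs with
  | nil => exact absurd hsp (pvSplit_ne_nil cs)
  | cons h r => simp [pvConsHead]

theorem pvALoop_eq (segs : List (List Char)) (idx : Int) :
    pvALoop segs idx = (pvFirst segs).map (fun k => idx + (k : Int)) := by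
  induction segs generalizing idx with
  | nil => rfl
  | cons seg rest ih =>
    simp only [pvALoop, pvFirst]
    by_cases h : pvAnySpecial seg = true
    · simp [h]
    · simp only [h, Bool.false_eq_true, if_false, ih, Option.map_map]
      cases pvFirst rest with
      | none => rfl
      | some k => simp; omega

-- pvFirst over pvSplit agrees with pvR's slash count
theorem pvFirst_eq (cs : List Char) :
    pvFirst (pvSplit cs) = (pvR cs).map (fun x => x.2.1) := by
  induction cs with
  | nil => rfl
  | cons c t ih =>
    cases hsc : pvSpecial c with
    | true =>
      have hns : c ≠ '/' := by
        intro h; subst h; simp [pvSpecial] at hsc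
      have e2 : pvR (c :: t) = some ([], 0, 0) := by simp [pvR, hsc]
      rw [e2]
      cases hsp : pvSplit t with
      | nil => exact absurd hsp (pvSplit_ne_nil t)
      | cons h r =>
        have e1 : pvSplit (c :: t) = (c :: h) :: r := by
          simp [pvSplit, hns, hsp]
        rw [e1]
        simp [pvFirst, pvAnySpecial_cons, hsc]
    | false =>
      by_cases hc : c = '/'
      · subst hc
        have e1 : pvSplit ('/' :: t) = [] :: pvSplit t := by simp [pvSplit]
        have e3 : pvFirst ([] :: pvSplit t) = (pvFirst (pvSplit t)).map (· + 1) := by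
          simp [pvFirst, pvAnySpecial_nil]
        rw [e1, e3, ih]
        cases hr : pvR t with
        | none => simp [pvR, hsc, hr]
        | some x =>
          obtain ⟨p, k, l⟩ := x
          simp [pvR, hsc, hr]
      · cases hsp : pvSplit t with
        | nil => exact absurd hsp (pvSplit_ne_nil t)
        | cons h r =>
          have e1 : pvSplit (c :: t) = (c :: h) :: r := by
            simp [pvSplit, hc, hsp]
          have e3 : pvFirst ((c :: h) :: r) = pvFirst (h :: r) := by
            simp [pvFirst, pvAnySpecial_cons, hsc]
          rw [e1, e3, ← hsp, ih]
          cases hr : pvR t with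
          | none => simp [pvR, hsc, hc, hr]
          | some x =>
            obtain ⟨p, k, l⟩ := x
            simp [pvR, hsc, hc, hr]

-- the joined prefix of the first k segments is pvR's prefix
theorem pvJoin_eq (cs : List Char) (p : List Char) (k l : Nat)
    (h : pvR cs = some (p, k, l)) :
    PySem.Chars.join ['/'] ((pvSplit cs).take k) = p := by
  induction cs generalizing p k l with
  | nil => simp [pvR] at h
  | cons c t ih =>
    by_cases hs : pvSpecial c = true
    · simp only [pvR, hs, if_true, Option.some_inj, Prod.mk.injEq] at h
      obtain ⟨hp, hk, hl⟩ := h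
      simp [← hp, ← hk, PySem.Chars.join_nil]
    · simp only [pvR, hs, Bool.false_eq_true, if_false] at h
      cases hr : pvR t with
      | none => simp [hr] at h
      | some x =>
        obtain ⟨p', k', l'⟩ := x
        simp only [hr] at h
        by_cases hc : c = '/'
        · subst hc
          simp at h
          obtain ⟨hp, hk, hl⟩ := h
          subst hk
          have e1 : pvSplit ('/' :: t) = [] :: pvSplit t := by simp [pvSplit]
          rw [e1]
          cases hk' : k' with
          | zero =>
            subst hk'
            simp only [List.take_succ_cons, List.take_zero]
            simp [PySem.Chars.join_singleton, ← hp]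
          | succ m =>
            subst hk'
            have hj := ih p' (m + 1) l' (by rw [hr])
            cases hsp : pvSplit t with
            | nil => exact absurd hsp (pvSplit_ne_nil t)
            | cons sh sr =>
              rw [hsp] at hj
              simp only [List.take_succ_cons] at hj ⊢
              rw [PySem.Chars.join_cons_cons]
              simp [← hp, hj]
        · simp [hc] at h
          obtain ⟨hp, hk, hl⟩ := h
          subst hk
          cases hsp : pvSplit t with
          | nil => exact absurd hsp (pvSplit_ne_nil t)
          | cons sh sr =>
            have e1 : pvSplit (c :: t) = (c :: sh) :: sr := by simp [pvSplit, hc, hsp]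
            rw [e1]
            have hj := ih p' k' l' (by rw [hr])
            rw [hsp] at hj
            cases hk' : k' with
            | zero => subst hk'; simp [← hp, PySem.Chars.join_nil]
            | succ m =>
              subst hk'
              simp only [List.take_succ_cons] at hj ⊢
              cases hts : sr.take m with
              | nil =>
                rw [hts] at hj
                rw [PySem.Chars.join_singleton] at hj
                rw [PySem.Chars.join_singleton]
                simp [← hp, hj]
              | cons u v =>
                rw [hts] at hj
                rw [PySem.Chars.join_cons_cons] at hj
                rw [PySem.Chars.join_cons_cons]
                simp [← hp, ← hj]

-- pvR's prefix is a take of the input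
theorem pvR_prefix (cs : List Char) (p : List Char) (k l : Nat)
    (h : pvR cs = some (p, k, l)) :
    (k = 0 → p = [] ∧ l = 0) ∧ (k ≠ 0 → p = cs.take l) := by
  induction cs generalizing p k l with
  | nil => simp [pvR] at h
  | cons c t ih =>
    by_cases hs : pvSpecial c = true
    · simp only [pvR, hs, if_true, Option.some_inj, Prod.mk.injEq] at h
      obtain ⟨hp, hk, hl⟩ := h
      simp [← hp, ← hk, ← hl]
    · simp only [pvR, hs, Bool.false_eq_true, if_false] at h
      cases hr : pvR t with
      | none => simp [hr] at h
      | some x =>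
        obtain ⟨p', k', l'⟩ := x
        simp only [hr] at h
        have ih' := ih p' k' l' (by rw [hr])
        by_cases hc : c = '/'
        · subst hc
          simp at h
          obtain ⟨hp, hk, hl⟩ := h
          subst hk
          refine ⟨fun h0 => by omega, fun _ => ?_⟩
          cases hk' : k' with
          | zero => subst hk'; simp at hp hl; simp [← hp, ← hl]
          | succ m =>
            subst hk'
            have hx := ih'.2 (by omega)
            simp only [Nat.succ_ne_zero, if_neg (by omega : ¬ m + 1 = 0)] at hp hl
            simp [← hp, ← hl, hx]
        · simp [hc] at h
          obtain ⟨hp, hk, hl⟩ := h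
          subst hk
          refine ⟨fun h0 => ?_, fun h0 => ?_⟩
          · subst h0; simp at hp hl
            exact ⟨hp, hl.symm⟩
          · have hx := ih'.2 h0
            simp only [if_neg h0] at hp hl
            simp [← hp, ← hl, hx]

-- the B loop, characterised via pvR
theorem pvBLoop_spec (cs : List Char) (done : List Char) (slashes last : Int) :
    pvBLoop (done ++ cs) cs (done.length : Int) slashes last =
      match pvR cs with
      | none => (none, none)
      | some (_, k, l) =>
        if k = 0 then
          (some (String.ofList (PySem.Chars.slice (done ++ cs) none (some last))), some slashes)
        else
          (some (String.ofList ((done ++ cs).take (done.length + l))), some (slashes + (k : Int))) := by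
  induction cs generalizing done slashes last with
  | nil => simp [pvBLoop, pvR]
  | cons c t ih =>
    by_cases hs : pvSpecial c = true
    · simp [pvBLoop, pvIsIn_eq, hs, pvR]
    · by_cases hc : c = '/'
      · subst hc
        have e0 : pvBLoop (done ++ '/' :: t) ('/' :: t) (done.length : Int) slashes last
            = pvBLoop ((done ++ ['/']) ++ t) t ((done ++ ['/']).length : Int) (slashes + 1) (done.length : Int) := by
          simp [pvBLoop, pvIsIn_eq, hs]
        have hstep : done ++ '/' :: t = (done ++ ['/']) ++ t := by simp
        rw [e0, ih (done ++ ['/']) (slashes + 1) (done.length : Int), hstep]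
        have e2 : pvR ('/' :: t)
            = match pvR t with
              | none => none
              | some (p, k, l) =>
                some ((if k = 0 then [] else '/' :: p), k + 1, if k = 0 then 0 else l + 1) := by
          simp [pvR, hs]
        rw [e2]
        cases hr : pvR t with
        | none => rfl
        | some x =>
          obtain ⟨p, k, l⟩ := x
          by_cases hk : k = 0
          · subst hk
            simp only [if_pos rfl, if_neg (by omega : ¬ (0 : Nat) + 1 = 0)]
            have hsl : PySem.Chars.slice ((done ++ ['/']) ++ t) none (some (done.length : Int))
                = ((done ++ ['/']) ++ t).take done.length := by
              rw [PySem.Chars.slice_eq_listSlice, PySem.List.slice_to _ (by omega)]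
              simp
            rw [Prod.mk.injEq, hsl]
            refine ⟨by simp, by norm_num⟩
          · have hidx : (done ++ ['/']).length + l = done.length + (l + 1) := by
              simp only [List.length_append, List.length_cons, List.length_nil]
              omega
            simp only [if_neg hk, if_neg (by omega : ¬ k + 1 = 0), hidx]
            rw [Prod.mk.injEq]
            refine ⟨rfl, ?_⟩
            congr 1
            push_cast
            ring
      · have hne : pvSpecial c = false := by simpa using hs
        have e0 : pvBLoop (done ++ c :: t) (c :: t) (done.length : Int) slashes last
            = pvBLoop ((done ++ [c]) ++ t) t ((done ++ [c]).length : Int) slashes last := by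
          simp [pvBLoop, pvIsIn_eq, hne, hc]
        have hstep : done ++ c :: t = (done ++ [c]) ++ t := by simp
        rw [e0, ih (done ++ [c]) slashes last, hstep]
        have e2 : pvR (c :: t)
            = match pvR t with
              | none => none
              | some (p, k, l) =>
                some ((if k = 0 then [] else c :: p), k, if k = 0 then 0 else l + 1) := by
          simp [pvR, hne, hc]
        rw [e2]
        cases hr : pvR t with
        | none => rfl
        | some x =>
          obtain ⟨p, k, l⟩ := x
          by_cases hk : k = 0
          · subst hk; simp
          · have hidx : (done ++ [c]).length + l = done.length + (l + 1) := by
              simp only [List.length_append, List.length_cons, List.length_nil]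
              omega
            simp only [if_neg hk, hidx]

-- ===== VERDICT (by name: the statement is the Claim_ definition above) =====
theorem find_root_prim_path_from_regex_spec : Claim_equal_find_root_prim_path_from_regex := by
  intro s _
  unfold Spec_find_root_prim_path_from_regex
  unfold find_root_prim_path_from_regex find_root_prim_path_from_regex_alt
  have hb := pvBLoop_spec s.toList [] 0 0
  simp only [List.nil_append, List.length_nil, Nat.cast_zero] at hb
  rw [hb, pvSplitOn_eq]
  unfold pvAResult
  rw [pvALoop_eq, pvFirst_eq]
  cases hr : pvR s.toList with
  | none => rfl
  | some x =>
    obtain ⟨p, k, l⟩ := x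
    have hpre := pvR_prefix s.toList p k l hr
    have hjoin := pvJoin_eq s.toList p k l hr
    by_cases hk : k = 0
    · obtain ⟨hp, hl⟩ := hpre.1 hk
      subst hk
      simp [PySem.List.slice_to, hjoin, hp, hl]
    · have hp := hpre.2 hk
      simp [PySem.List.slice_to, hjoin, hp, hk]
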